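-- pv_equiv track=rewrite | github.com/rushi055/AI-LABS | Lab 2/Submission/plagarism_detection.py | detect_plagiarism
-- ===== SOURCE A (Python) =====
-- def edit_distance(s1, s2):
--     n, m = len(s1), len(s2)
--     dp = [[0] * (m + 1) for _ in range(n + 1)]
--
--     # Initialize dp table
--     for i in range(n + 1):
--         dp[i][0] = i
--     for j in range(m + 1):
--         dp[0][j] = j
--
--     # Fill dp table
--     for i in range(1, n + 1):
--         for j in range(1, m + 1):
--             if s1[i - 1] == s2[j - 1]:
--                 dp[i][j] = dp[i - 1][j - 1]
--             else:
--                 dp[i][j] = 1 + min(dp[i - 1][j], dp[i][j - 1], dp[i - 1][j - 1])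
--
--     return dp[n][m]
--
-- def detect_plagiarism(alignment, doc1, doc2, threshold=10):
--     plagiarized_pairs = []
--
--     for i, j in alignment:
--         if i is not None and j is not None:
--             cost = edit_distance(doc1[i], doc2[j])
--             if cost <= threshold:  # Low edit distance implies potential plagiarism
--                 plagiarized_pairs.append((i, j, cost))
--
--     return plagiarized_pairs
-- ===== SOURCE B (Python) =====
-- def bounded_edit_distance(s1, s2, threshold):
--     """Edit distance of s1, s2 computed with a rolling row and Ukkonen-style
--     cutoffs; returns the exact distance if it is <= threshold, else None."""
--     n, m = len(s1), len(s2)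
--     if abs(n - m) > threshold:
--         return None  # edit distance >= |n - m| > threshold
--     row = list(range(m + 1))
--     for a in range(1, n + 1):
--         prev = row[0]
--         row[0] = a
--         for b in range(1, m + 1):
--             cur = row[b]
--             if s1[a - 1] == s2[b - 1]:
--                 row[b] = prev
--             else:
--                 row[b] = 1 + min(row[b], row[b - 1], prev)
--             prev = cur
--         if min(row) > threshold:
--             return None  # every later row is >= min(row) > threshold
--     return row[m] if row[m] <= threshold else None
--
--
-- def detect_plagiarism(alignment, doc1, doc2, threshold=10):
--     pairs = []
--     for i, j in alignment:
--         if i is not None and j is not None: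
--             cost = bounded_edit_distance(doc1[i], doc2[j], threshold)
--             if cost is not None:
--                 pairs.append((i, j, cost))
--     return pairs
-- ===== Notes on version B (the rewrite author's own statement) =====
-- stated objective: alternative
-- what changed: A fills the full (n+1)x(m+1) Wagner-Fischer table for every aligned pair; B computes a threshold-bounded edit distance instead: a |len1-len2| > threshold pre-filter, a single rolling row in O(m) memory, and a Ukkonen-style row-minimum cutoff that stops a pair as soon as every entry of the current row exceeds the threshold.
import Mathlib
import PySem

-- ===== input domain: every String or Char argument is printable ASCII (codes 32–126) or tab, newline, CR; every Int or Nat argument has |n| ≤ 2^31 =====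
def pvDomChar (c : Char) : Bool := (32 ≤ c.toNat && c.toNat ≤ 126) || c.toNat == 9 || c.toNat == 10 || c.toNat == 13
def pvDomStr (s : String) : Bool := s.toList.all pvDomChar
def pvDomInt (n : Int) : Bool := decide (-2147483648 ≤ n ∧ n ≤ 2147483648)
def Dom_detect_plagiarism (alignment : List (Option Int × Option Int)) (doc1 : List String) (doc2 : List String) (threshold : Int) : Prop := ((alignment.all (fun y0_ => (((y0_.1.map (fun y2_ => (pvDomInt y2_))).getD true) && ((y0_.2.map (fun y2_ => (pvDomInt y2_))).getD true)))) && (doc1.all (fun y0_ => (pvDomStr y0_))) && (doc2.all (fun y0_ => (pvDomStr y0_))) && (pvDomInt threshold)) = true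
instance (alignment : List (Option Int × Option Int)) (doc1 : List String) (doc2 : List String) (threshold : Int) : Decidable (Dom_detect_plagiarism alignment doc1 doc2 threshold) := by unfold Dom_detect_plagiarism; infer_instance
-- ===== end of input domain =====

-- B replaces the full (n+1)×(m+1) Wagner–Fischer table with a threshold-bounded
-- computation: a |len1−len2| > threshold pre-filter, a single rolling row, and a
-- Ukkonen-style row-minimum cutoff. Equality of return values is proved below.

-- ===== PORT A =====
-- A-side helpers: dp[i][j] read/write on the list-of-lists matrix (all indices
-- used by A are non-negative and in range, so getD/set are exact here).
def mget (dp : List (List Int)) (i j : Nat) : Int := (dp.getD i []).getD j 0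
def mset (dp : List (List Int)) (i j : Nat) (v : Int) : List (List Int) :=
  dp.set i ((dp.getD i []).set j v)

-- the body of A's innermost loop (s1[i-1], s2[j-1] with 1 ≤ i,j in range, so getD is exact)
def fillCell (cs1 cs2 : List Char) (dp : List (List Int)) (i j : Nat) : List (List Int) :=
  if cs1.getD (i - 1) ' ' = cs2.getD (j - 1) ' ' then
    mset dp i j (mget dp (i - 1) (j - 1))
  else
    mset dp i j (1 + min (min (mget dp (i - 1) j) (mget dp i (j - 1))) (mget dp (i - 1) (j - 1)))

def edit_distance (s1 s2 : String) : Int :=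
  let cs1 := s1.toList
  let cs2 := s2.toList
  let n := cs1.length
  let m := cs2.length
  -- dp = [[0] * (m + 1) for _ in range(n + 1)]
  let dp0 := List.replicate (n + 1) (List.replicate (m + 1) (0 : Int))
  -- for i in range(n + 1): dp[i][0] = i
  let dp1 := (PySem.List.pyRange 0 ((n : Int) + 1) 1).foldl (fun dp i => mset dp i.toNat 0 i) dp0
  -- for j in range(m + 1): dp[0][j] = j
  let dp2 := (PySem.List.pyRange 0 ((m : Int) + 1) 1).foldl (fun dp j => mset dp 0 j.toNat j) dp1
  -- nested fill loops
  let dp3 := (PySem.List.pyRange 1 ((n : Int) + 1) 1).foldl (fun dp i =>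
      (PySem.List.pyRange 1 ((m : Int) + 1) 1).foldl (fun dp j =>
        fillCell cs1 cs2 dp i.toNat j.toNat) dp) dp2
  mget dp3 n m

def detect_plagiarism (alignment : List (Option Int × Option Int)) (doc1 : List String) (doc2 : List String) (threshold : Int) : List (Int × Int × Int) :=
  alignment.foldl (fun acc p =>
    match p.1, p.2 with
    | some i, some j =>
        -- doc1[i], doc2[j]: in range under Pre_ (Python raises IndexError otherwise)
        let cost := edit_distance (PySem.List.pyGetD doc1 i "") (PySem.List.pyGetD doc2 j "")
        if cost ≤ threshold then acc ++ [(i, j, cost)] else acc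
    | _, _ => acc) []

-- ===== PORT B =====
-- B-side helpers.  bStep: one iteration of B's outer loop — update the rolling
-- row in place, carrying the previous diagonal value (state = (row, prev)).
def bStep (cs1 cs2 : List Char) (row0 : List Int) (a : Nat) : List Int :=
  let m := cs2.length
  let prev := row0.getD 0 0
  let row1 := row0.set 0 (a : Int)
  ((PySem.List.pyRange 1 ((m : Int) + 1) 1).foldl (fun (st : List Int × Int) b =>
      let cur := st.1.getD b.toNat 0
      if cs1.getD (a - 1) ' ' = cs2.getD (b.toNat - 1) ' ' then
        (st.1.set b.toNat st.2, cur)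
      else
        (st.1.set b.toNat (1 + min (min (st.1.getD b.toNat 0) (st.1.getD (b.toNat - 1) 0)) st.2), cur))
    (row1, prev)).1

-- the rest of B's outer loop: rows a, a+1, …, with the row-minimum cutoff
-- (`min(row)` on a non-empty row; the [] branch of min? is unreachable)
def bGo (cs1 cs2 : List Char) (t : Int) : List Int → List Int → Option (List Int)
  | [], row => some row
  | a :: rest, row =>
      let row' := bStep cs1 cs2 row a.toNat
      match PySem.List.min? row' (fun y => y) with
      | none => none
      | some v => if t < v then none else bGo cs1 cs2 t rest row'

def bounded_edit_distance (s1 s2 : String) (threshold : Int) : Option Int :=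
  let cs1 := s1.toList
  let cs2 := s2.toList
  let n := cs1.length
  let m := cs2.length
  if threshold < |(n : Int) - (m : Int)| then none
  else
    match bGo cs1 cs2 threshold (PySem.List.pyRange 1 ((n : Int) + 1) 1)
            (PySem.List.pyRange 0 ((m : Int) + 1) 1) with
    | none => none
    | some row =>
        let cost := row.getD m 0
        if cost ≤ threshold then some cost else none

def detect_plagiarism_alt (alignment : List (Option Int × Option Int)) (doc1 : List String) (doc2 : List String) (threshold : Int) : List (Int × Int × Int) :=
  alignment.foldl (fun acc p =>
    match p.1 with
    | none => acc
    | some i =>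
        match p.2 with
        | none => acc
        | some j =>
            match bounded_edit_distance (PySem.List.pyGetD doc1 i "") (PySem.List.pyGetD doc2 j "") threshold with
            | some cost => acc ++ [(i, j, cost)]
            | none => acc) []

-- ===== PRECONDITION & SPEC =====
-- Pre_ excludes exactly the inputs where Python A raises IndexError: an aligned
-- pair (i, j) with i out of range of doc1 or j out of range of doc2.
def Pre_detect_plagiarism (alignment : List (Option Int × Option Int)) (doc1 : List String) (doc2 : List String) (threshold : Int) : Prop :=
  ∀ p ∈ alignment, p.1.isSome = true → p.2.isSome = true →
    PySem.Raise.InRange doc1.length (p.1.getD 0) ∧ PySem.Raise.InRange doc2.length (p.2.getD 0)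

instance (alignment : List (Option Int × Option Int)) (doc1 : List String) (doc2 : List String) (threshold : Int) : Decidable (Pre_detect_plagiarism alignment doc1 doc2 threshold) := by
  unfold Pre_detect_plagiarism; infer_instance

def pvWitness_detect_plagiarism : (List (Option Int × Option Int)) × List String × List String × Int :=
  ([(some 0, some 0), (some 1, none), (none, some 0)], ["abc", "xy"], ["axc"], 2)

def Spec_detect_plagiarism (alignment : List (Option Int × Option Int)) (doc1 : List String) (doc2 : List String) (threshold : Int) (out : List (Int × Int × Int)) : Prop := out = detect_plagiarism_alt alignment doc1 doc2 threshold
instance (alignment : List (Option Int × Option Int)) (doc1 : List String) (doc2 : List String) (threshold : Int) (out : List (Int × Int × Int)) : Decidable (Spec_detect_plagiarism alignment doc1 doc2 threshold out) := by unfold Spec_detect_plagiarism; infer_instance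

-- ===== CLAIM (what is proved, stated in full; the proofs are below) =====
def Claim_equal_detect_plagiarism : Prop := ∀ (alignment : List (Option Int × Option Int)) (doc1 : List String) (doc2 : List String) (threshold : Int), Dom_detect_plagiarism alignment doc1 doc2 threshold → Pre_detect_plagiarism alignment doc1 doc2 threshold → Spec_detect_plagiarism alignment doc1 doc2 threshold (detect_plagiarism alignment doc1 doc2 threshold)

-- ===== LEMMAS AND PROOFS =====

def D (cs1 cs2 : List Char) : Nat → Nat → Int
  | 0, j => (j : Int)
  | (i+1), 0 => ((i : Int) + 1)
  | (i+1), (j+1) =>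
      if cs1.getD i ' ' = cs2.getD j ' ' then D cs1 cs2 i j
      else 1 + min (min (D cs1 cs2 i (j+1)) (D cs1 cs2 (i+1) j)) (D cs1 cs2 i j)
  termination_by i j => i + j
lemma D_zero_left (cs1 cs2 : List Char) (j : Nat) : D cs1 cs2 0 j = (j : Int) := by
  cases j <;> simp [D]
lemma D_zero_right (cs1 cs2 : List Char) (i : Nat) : D cs1 cs2 i 0 = (i : Int) := by
  cases i <;> simp [D]
lemma D_succ_succ (cs1 cs2 : List Char) (i j : Nat) :
    D cs1 cs2 (i+1) (j+1) =
      if cs1.getD i ' ' = cs2.getD j ' ' then D cs1 cs2 i j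
      else 1 + min (min (D cs1 cs2 i (j+1)) (D cs1 cs2 (i+1) j)) (D cs1 cs2 i j) := by
  rw [D]

lemma D_lb (cs1 cs2 : List Char) : ∀ i j : Nat, |(i : Int) - (j : Int)| ≤ D cs1 cs2 i j := by
  intro i
  induction i with
  | zero => intro j; rw [D_zero_left, abs_le]; push_cast; omega
  | succ i ih =>
      intro j
      induction j with
      | zero => rw [D_zero_right, abs_le]; push_cast; omega
      | succ j ihj =>
          rw [D_succ_succ]
          have h1 := abs_le.mp (ih j)
          have h2 := abs_le.mp (ih (j+1))
          have h3 := abs_le.mp ihj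
          rw [abs_le]
          split_ifs
          · push_cast at h1 ⊢; omega
          · push_cast at h1 h2 h3 ⊢; omega

def Mfn (n m : Nat) (f : Nat → Nat → Int) : List (List Int) :=
  (List.range (n+1)).map (fun i => (List.range (m+1)).map (f i))

lemma mget_Mfn {n m i j : Nat} (f : Nat → Nat → Int) (hi : i ≤ n) (hj : j ≤ m) :
    mget (Mfn n m f) i j = f i j := by
  have hi' : i < n + 1 := by omega
  have hj' : j < m + 1 := by omega
  simp [mget, Mfn, List.getD, List.getElem?_map, List.getElem?_range, hi', hj']

lemma Mfn_congr {n m : Nat} {f g : Nat → Nat → Int}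
    (h : ∀ a ≤ n, ∀ b ≤ m, f a b = g a b) : Mfn n m f = Mfn n m g := by
  unfold Mfn
  refine List.map_congr_left ?_
  intro a ha
  refine List.map_congr_left ?_
  intro b hb
  exact h a (by simp at ha; omega) b (by simp at hb; omega)

lemma mset_Mfn {n m i j : Nat} (f : Nat → Nat → Int) (v : Int) (hi : i ≤ n) (hj : j ≤ m) :
    mset (Mfn n m f) i j v = Mfn n m (fun a b => if a = i ∧ b = j then v else f a b) := by
  have hrow : (Mfn n m f).getD i [] = (List.range (m+1)).map (f i) := by
    have hi' : i < n + 1 := by omega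
    simp [Mfn, List.getD, List.getElem?_map, List.getElem?_range, hi']
  unfold mset
  rw [hrow]
  apply List.ext_getElem
  · simp [Mfn]
  · intro a h1 h2
    rw [List.getElem_set]
    have ha : a < n + 1 := by simp [Mfn] at h2; omega
    by_cases hai : i = a
    · subst hai
      simp only [Mfn, List.getElem_map, List.getElem_range, if_true]
      apply List.ext_getElem
      · simp
      · intro b hb1 hb2
        rw [List.getElem_set]
        have hb : b < m + 1 := by simp at hb2; omega
        simp only [List.getElem_map, List.getElem_range]
        by_cases hbj : j = b
        · subst hbj; simp
        · simp [hbj]; exact fun h => absurd h.symm hbj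
    · simp only [Mfn, List.getElem_map, List.getElem_range, if_neg hai]
      refine List.map_congr_left ?_
      intro b hb
      have : ¬ (a = i ∧ b = j) := fun hc => hai hc.1.symm
      simp [this]

lemma cutoff_step (cs1 cs2 : List Char) (t : Int) (m a : Nat)
    (h : ∀ j ≤ m, t < D cs1 cs2 a j) : ∀ j ≤ m, t < D cs1 cs2 (a+1) j := by
  intro j
  induction j with
  | zero =>
      intro _
      have h0 := h 0 (by omega)
      rw [D_zero_right] at h0 ⊢
      push_cast at h0 ⊢; omega
  | succ j ihj =>
      intro hjm
      rw [D_succ_succ]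
      have h1 := h j (by omega)
      have h2 := h (j+1) hjm
      have h3 := ihj (by omega)
      split_ifs
      · exact h1
      · omega

lemma cutoff_chain (cs1 cs2 : List Char) (t : Int) (m : Nat) {a n : Nat} (han : a ≤ n)
    (h : ∀ j ≤ m, t < D cs1 cs2 a j) : t < D cs1 cs2 n m := by
  have key : ∀ k, ∀ j ≤ m, t < D cs1 cs2 (a + k) j := by
    intro k
    induction k with
    | zero => simpa using h
    | succ k ih => exact cutoff_step cs1 cs2 t m (a + k) ih
  have hfin := key (n - a) m le_rfl
  rwa [Nat.add_sub_cancel' han] at hfin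

-- fold over pyRange 0 (n+1) as fold over List.range (n+1)
lemma foldl_pyRange_zero_succ {α : Type} (f : α → Int → α) (n : Nat) (init : α) :
    (PySem.List.pyRange 0 ((n : Int) + 1) 1).foldl f init
      = (List.range (n+1)).foldl (fun acc (k : Nat) => f acc (k : Int)) init := by
  conv_lhs => rw [show ((n : Int) + 1) = ((n + 1 : Nat) : Int) by push_cast; ring,
     PySem.List.pyRange_zero_nat, List.foldl_map]

lemma foldl_pyRange_one_succ {α : Type} (f : α → Int → α) (n : Nat) (init : α) :
    (PySem.List.pyRange 1 ((n : Int) + 1) 1).foldl f init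
      = (List.range n).foldl (fun acc (k : Nat) => f acc (1 + (k : Int))) init := by
  conv_lhs => rw [PySem.List.pyRange_one, show ((n : Int) + 1 - 1).toNat = n by omega,
    List.foldl_map]

def borderF (a b : Nat) : Int := if a = 0 then (b : Int) else if b = 0 then (a : Int) else 0

def GF (cs1 cs2 : List Char) (k a b : Nat) : Int :=
  if a ≤ k then D cs1 cs2 a b else borderF a b

lemma stage0 (n m : Nat) :
    List.replicate (n+1) (List.replicate (m+1) (0 : Int)) = Mfn n m (fun _ _ => 0) := by
  simp [Mfn, List.map_const]

lemma stage1 (n m : Nat) :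
    (List.range (n+1)).foldl (fun dp k => mset dp k 0 (k : Int)) (Mfn n m (fun _ _ => 0))
      = Mfn n m (fun a b => if b = 0 then (a : Int) else 0) := by
  have aux : ∀ l, l ≤ n + 1 →
      (List.range l).foldl (fun dp k => mset dp k 0 (k : Int)) (Mfn n m (fun _ _ => 0))
        = Mfn n m (fun a b => if b = 0 ∧ a < l then (a : Int) else 0) := by
    intro l
    induction l with
    | zero => intro _; simp only [List.range_zero, List.foldl_nil]; exact Mfn_congr (by intro a _ b _; simp)
    | succ l ih =>
        intro hl
        rw [List.range_succ, List.foldl_append, ih (by omega), List.foldl_cons, List.foldl_nil,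
           mset_Mfn _ _ (by omega) (by omega)]
        refine Mfn_congr ?_
        intro a _ b _
        split_ifs <;> first | rfl | omega | (exfalso; omega) | (simp; omega)
  rw [aux (n+1) le_rfl]
  exact Mfn_congr (by intro a ha b _; split_ifs <;> first | rfl | omega)

lemma stage2 (n m : Nat) :
    (List.range (m+1)).foldl (fun dp k => mset dp 0 k (k : Int))
        (Mfn n m (fun a b => if b = 0 then (a : Int) else 0))
      = Mfn n m borderF := by
  have aux : ∀ l, l ≤ m + 1 →
      (List.range l).foldl (fun dp k => mset dp 0 k (k : Int))
          (Mfn n m (fun a b => if b = 0 then (a : Int) else 0))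
        = Mfn n m (fun a b => if a = 0 ∧ b < l then (b : Int)
            else if b = 0 then (a : Int) else 0) := by
    intro l
    induction l with
    | zero =>
        intro _
        simp only [List.range_zero, List.foldl_nil]
        exact Mfn_congr (by intro a _ b _; simp)
    | succ l ih =>
        intro hl
        rw [List.range_succ, List.foldl_append, ih (by omega), List.foldl_cons, List.foldl_nil,
           mset_Mfn _ _ (by omega) (by omega)]
        refine Mfn_congr ?_
        intro a _ b _
        split_ifs <;> first | rfl | omega
  rw [aux (m+1) le_rfl]
  refine Mfn_congr ?_
  intro a _ b hb
  unfold borderF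
  split_ifs <;> first | rfl | omega

lemma borderF_eq_D (cs1 cs2 : List Char) (a b : Nat) (h : a = 0 ∨ b = 0) :
    borderF a b = D cs1 cs2 a b := by
  rcases h with h | h
  · subst h; simp [borderF, D_zero_left]
  · subst h
    rw [D_zero_right]
    unfold borderF
    by_cases ha : a = 0
    · subst ha; simp
    · rw [if_neg ha, if_pos rfl]

-- one full inner row of A's fill loop
lemma fillRow (cs1 cs2 : List Char) (n m i : Nat) (hi1 : 1 ≤ i) (hin : i ≤ n) :
    (List.range m).foldl (fun dp k => fillCell cs1 cs2 dp i (k+1)) (Mfn n m (GF cs1 cs2 (i-1)))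
      = Mfn n m (GF cs1 cs2 i) := by
  set HF : Nat → Nat → Nat → Int := fun l a b =>
    if a < i then D cs1 cs2 a b
    else if a = i then (if b ≤ l then D cs1 cs2 i b else borderF a b)
    else borderF a b with hHF
  have aux : ∀ l, l ≤ m →
      (List.range l).foldl (fun dp k => fillCell cs1 cs2 dp i (k+1)) (Mfn n m (GF cs1 cs2 (i-1)))
        = Mfn n m (HF l) := by
    intro l
    induction l with
    | zero =>
        intro _
        simp only [List.range_zero, List.foldl_nil]
        refine Mfn_congr ?_
        intro a _ b _
        simp only [hHF, GF]
        split_ifs <;> subst_vars <;>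
          first
          | rfl
          | (exfalso; omega)
          | (exact borderF_eq_D cs1 cs2 _ _ (Or.inr (by omega)))
    | succ l ih =>
        intro hl
        rw [List.range_succ, List.foldl_append, ih (by omega), List.foldl_cons, List.foldl_nil]
        have HFmono : ∀ a b : Nat, ¬(a = i ∧ b = l + 1) → HF l a b = HF (l+1) a b := by
          intro a b hab
          simp only [hHF]
          split_ifs <;>
            first
            | rfl
            | (exfalso; omega)
            | (exfalso; apply hab; constructor <;> first | assumption | omega)
        have HFtop : HF (l+1) i (l+1) = D cs1 cs2 i (l+1) := by
          simp only [hHF]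
          split_ifs <;> first | rfl | (exfalso; omega)
        unfold fillCell
        have e1 : mget (Mfn n m (HF l)) (i-1) (l+1-1) = D cs1 cs2 (i-1) l := by
          rw [mget_Mfn _ (by omega) (by omega)]
          simp only [hHF]
          split_ifs <;> first | (congr 1 <;> omega) | (exfalso; omega)
        have e2 : mget (Mfn n m (HF l)) (i-1) (l+1) = D cs1 cs2 (i-1) (l+1) := by
          rw [mget_Mfn _ (by omega) (by omega)]
          simp only [hHF]
          split_ifs <;> first | rfl | (exfalso; omega)
        have e3 : mget (Mfn n m (HF l)) i (l+1-1) = D cs1 cs2 i l := by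
          rw [mget_Mfn _ (by omega) (by omega)]
          simp only [hHF]
          split_ifs <;> first | (congr 1 <;> omega) | (exfalso; omega)
        have hD : D cs1 cs2 i (l+1) =
            if cs1.getD (i-1) ' ' = cs2.getD (l+1-1) ' ' then D cs1 cs2 (i-1) l
            else 1 + min (min (D cs1 cs2 (i-1) (l+1)) (D cs1 cs2 i l)) (D cs1 cs2 (i-1) l) := by
          obtain ⟨i', rfl⟩ : ∃ i', i = i' + 1 := ⟨i - 1, by omega⟩
          rw [D_succ_succ]
          simp only [Nat.add_sub_cancel]
        by_cases hc : cs1.getD (i-1) ' ' = cs2.getD (l+1-1) ' '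
        · rw [if_pos hc, e1, mset_Mfn _ _ (by omega) (by omega)]
          refine Mfn_congr ?_
          intro a _ b _
          by_cases hcase : a = i ∧ b = l + 1
          · rw [if_pos hcase]
            obtain ⟨rfl, rfl⟩ := hcase
            rw [HFtop, hD, if_pos hc]
          · rw [if_neg hcase, HFmono a b hcase]
        · rw [if_neg hc, e1, e2, e3, mset_Mfn _ _ (by omega) (by omega)]
          refine Mfn_congr ?_
          intro a _ b _
          by_cases hcase : a = i ∧ b = l + 1
          · rw [if_pos hcase]
            obtain ⟨rfl, rfl⟩ := hcase
            rw [HFtop, hD, if_neg hc]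
          · rw [if_neg hcase, HFmono a b hcase]
  rw [aux m le_rfl]
  refine Mfn_congr ?_
  intro a _ b hb
  simp only [hHF, GF]
  split_ifs <;> subst_vars <;> first | rfl | (exfalso; omega)

lemma toNat_one_add_natCast (k : Nat) : ((1 : Int) + (k : Int)).toNat = k + 1 := by omega

lemma edit_distance_eq_D (s1 s2 : String) :
    edit_distance s1 s2 = D s1.toList s2.toList s1.toList.length s2.toList.length := by
  unfold edit_distance
  dsimp only
  rw [foldl_pyRange_zero_succ, foldl_pyRange_zero_succ, foldl_pyRange_one_succ]
  simp only [foldl_pyRange_one_succ, Int.toNat_natCast, toNat_one_add_natCast]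
  rw [stage0, stage1, stage2]
  have outer : ∀ l, l ≤ s1.toList.length →
      (List.range l).foldl (fun dp k =>
          (List.range s2.toList.length).foldl
            (fun dp j => fillCell s1.toList s2.toList dp (k+1) (j+1)) dp)
        (Mfn s1.toList.length s2.toList.length borderF)
      = Mfn s1.toList.length s2.toList.length (GF s1.toList s2.toList l) := by
    intro l
    induction l with
    | zero =>
        intro _
        simp only [List.range_zero, List.foldl_nil]
        refine Mfn_congr ?_
        intro a _ b _
        unfold GF
        by_cases h : a ≤ 0
        · rw [if_pos h, (borderF_eq_D s1.toList s2.toList a b (Or.inl (by omega))).symm]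
        · rw [if_neg h]
    | succ l ih =>
        intro hl
        rw [List.range_succ, List.foldl_append, ih (by omega), List.foldl_cons, List.foldl_nil]
        have := fillRow s1.toList s2.toList s1.toList.length s2.toList.length (l+1)
          (by omega) (by omega)
        simpa using this
  rw [outer s1.toList.length le_rfl, mget_Mfn _ le_rfl le_rfl]
  unfold GF
  rw [if_pos le_rfl]

-- ----- B side -----

def rowD (cs1 cs2 : List Char) (m a : Nat) : List Int :=
  (List.range (m+1)).map (fun j => D cs1 cs2 a j)

lemma getD_map_range (f : Nat → Int) (M j : Nat) (h : j < M) :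
    (((List.range M).map f).getD j 0) = f j := by
  rw [List.getD_eq_getElem _ _ (by simp; omega)]
  simp

lemma set_map_range (f : Nat → Int) (M j : Nat) (v : Int) (h : j < M) :
    ((List.range M).map f).set j v = (List.range M).map (fun c => if c = j then v else f c) := by
  apply List.ext_getElem
  · simp
  · intro c h1 h2
    rw [List.getElem_set]
    simp only [List.getElem_map, List.getElem_range]
    by_cases hc : j = c
    · subst hc; simp
    · rw [if_neg hc, if_neg (fun hh => hc hh.symm)]

lemma map_range_congr (f g : Nat → Int) (M : Nat) (h : ∀ c < M, f c = g c) :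
    (List.range M).map f = (List.range M).map g := by
  refine List.map_congr_left ?_
  intro c hc
  exact h c (by simpa using hc)

lemma bStep_rowD (cs1 cs2 : List Char) (a : Nat) :
    bStep cs1 cs2 (rowD cs1 cs2 cs2.length a) (a + 1) = rowD cs1 cs2 cs2.length (a + 1) := by
  unfold bStep
  dsimp only
  rw [foldl_pyRange_one_succ]
  simp only [toNat_one_add_natCast, Nat.add_sub_cancel]
  set m := cs2.length with hm
  -- the rolling state after processing b = 1..k
  set mix : Nat → List Int := fun k =>
    (List.range (m+1)).map (fun c => if c ≤ k then D cs1 cs2 (a+1) c else D cs1 cs2 a c)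
    with hmix
  have aux : ∀ l, l ≤ m →
      (List.range l).foldl (fun (st : List Int × Int) (k : Nat) =>
          (if cs1.getD a ' ' = cs2.getD k ' '
           then (st.1.set (k+1) st.2, st.1.getD (k+1) 0)
           else (st.1.set (k+1)
                  (1 + min (min (st.1.getD (k+1) 0) (st.1.getD k 0)) st.2), st.1.getD (k+1) 0)))
        ((rowD cs1 cs2 m a).set 0 ((a + 1 : Nat) : Int), (rowD cs1 cs2 m a).getD 0 0)
      = (mix l, D cs1 cs2 a l) := by
    intro l
    induction l with
    | zero =>
        intro _
        simp only [List.range_zero, List.foldl_nil]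
        refine Prod.ext ?_ ?_
        · unfold rowD
          rw [set_map_range _ _ _ _ (by omega)]
          simp only [hmix]
          refine map_range_congr _ _ _ ?_
          intro c _
          by_cases hc : c = 0
          · subst hc
            rw [if_pos rfl, if_pos (le_refl 0), D_zero_right]
          · rw [if_neg hc, if_neg (by omega)]
        · unfold rowD
          rw [getD_map_range _ _ _ (by omega)]
    | succ l ih =>
        intro hl
        rw [List.range_succ, List.foldl_append, ih (by omega), List.foldl_cons, List.foldl_nil]
        have r1 : (mix l).getD (l+1) 0 = D cs1 cs2 a (l+1) := by
          simp only [hmix]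
          rw [getD_map_range _ _ _ (by omega), if_neg (by omega)]
        have r2 : (mix l).getD l 0 = D cs1 cs2 (a+1) l := by
          simp only [hmix]
          rw [getD_map_range _ _ _ (by omega), if_pos le_rfl]
        have hsetv : ∀ v : Int, (mix l).set (l+1) v
            = (List.range (m+1)).map (fun c => if c = l + 1 then v
                else if c ≤ l then D cs1 cs2 (a+1) c else D cs1 cs2 a c) := by
          intro v
          simp only [hmix]
          rw [set_map_range _ _ _ _ (by omega)]
        have hDv : D cs1 cs2 (a+1) (l+1) =
            if cs1.getD a ' ' = cs2.getD l ' ' then D cs1 cs2 a l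
            else 1 + min (min (D cs1 cs2 a (l+1)) (D cs1 cs2 (a+1) l)) (D cs1 cs2 a l) :=
          D_succ_succ cs1 cs2 a l
        have hmixsucc : ∀ v : Int, v = D cs1 cs2 (a+1) (l+1) →
            (mix l).set (l+1) v = mix (l+1) := by
          intro v hv
          rw [hsetv, hmix]
          refine map_range_congr _ _ _ ?_
          intro c _
          by_cases hc : c = l + 1
          · subst hc; rw [if_pos rfl, if_pos le_rfl, hv]
          · rw [if_neg hc]
            by_cases hcl : c ≤ l
            · rw [if_pos hcl, if_pos (by omega)]
            · rw [if_neg hcl, if_neg (by omega)]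
        by_cases hc : cs1.getD a ' ' = cs2.getD l ' '
        · rw [if_pos hc]
          simp only []
          rw [r1, hmixsucc _ (by rw [hDv, if_pos hc])]
        · rw [if_neg hc]
          simp only []
          rw [r1, r2, hmixsucc _ (by rw [hDv, if_neg hc])]
  rw [aux m le_rfl]
  simp only [hmix]
  unfold rowD
  refine map_range_congr _ _ _ ?_
  intro c hc
  rw [if_pos (by omega)]

lemma rowD_cons (cs1 cs2 : List Char) (m a : Nat) :
    rowD cs1 cs2 m a
      = D cs1 cs2 a 0 :: (List.range m).map (fun j => D cs1 cs2 a (j+1)) := by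
  unfold rowD
  rw [List.range_succ_eq_map, List.map_cons, List.map_map]
  rfl

lemma mem_rowD_le (cs1 cs2 : List Char) (m a : Nat) {t : Int}
    (h : t < List.foldl min (D cs1 cs2 a 0) ((List.range m).map (fun j => D cs1 cs2 a (j+1)))) :
    ∀ j ≤ m, t < D cs1 cs2 a j := by
  intro j hj
  have hle := PySem.List.foldl_min_le
    ((List.range m).map (fun j => D cs1 cs2 a (j+1))) (D cs1 cs2 a 0)
  match j with
  | 0 => exact lt_of_lt_of_le h hle.1
  | j+1 =>
      refine lt_of_lt_of_le h (hle.2 _ ?_)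
      exact List.mem_map.mpr ⟨j, List.mem_range.mpr (by omega), rfl⟩

lemma bGo_cases (cs1 cs2 : List Char) (t : Int) (n : Nat) (hn : n = cs1.length) :
    ∀ fuel k, k ≤ n → n - k = fuel →
      bGo cs1 cs2 t (PySem.List.pyRange ((k : Int) + 1) ((n : Int) + 1) 1)
          (rowD cs1 cs2 cs2.length k) = some (rowD cs1 cs2 cs2.length n)
      ∨ (bGo cs1 cs2 t (PySem.List.pyRange ((k : Int) + 1) ((n : Int) + 1) 1)
          (rowD cs1 cs2 cs2.length k) = none ∧ t < D cs1 cs2 n cs2.length) := by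
  intro fuel
  induction fuel with
  | zero =>
      intro k hk hfuel
      have : k = n := by omega
      subst this
      rw [PySem.List.pyRange_one_eq_nil (by omega)]
      exact Or.inl rfl
  | succ fuel ih =>
      intro k hk hfuel
      have hkn : k < n := by omega
      rw [PySem.List.pyRange_one_cons (by push_cast; omega)]
      have hstep : bStep cs1 cs2 (rowD cs1 cs2 cs2.length k) ((k : Int) + 1).toNat
          = rowD cs1 cs2 cs2.length (k + 1) := by
        rw [show ((k : Int) + 1).toNat = k + 1 by omega]
        exact bStep_rowD cs1 cs2 k
      simp only [bGo]
      rw [hstep, rowD_cons cs1 cs2 cs2.length (k+1), PySem.List.min?_id_cons]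
      dsimp only
      rw [← rowD_cons]
      by_cases hmin : t < List.foldl min (D cs1 cs2 (k+1) 0)
          ((List.range cs2.length).map (fun j => D cs1 cs2 (k+1) (j+1)))
      · rw [if_pos hmin]
        refine Or.inr ⟨rfl, ?_⟩
        exact cutoff_chain cs1 cs2 t cs2.length (by omega)
          (mem_rowD_le cs1 cs2 cs2.length (k+1) hmin)
      · rw [if_neg hmin]
        have := ih (k+1) (by omega) (by omega)
        rw [show ((k : Int) + 1) + 1 = (((k+1 : Nat) : Int)) + 1 by push_cast; ring]
        exact this

lemma rowD_getD_last (cs1 cs2 : List Char) (m a : Nat) :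
    (rowD cs1 cs2 m a).getD m 0 = D cs1 cs2 a m := by
  unfold rowD
  exact getD_map_range _ _ _ (by omega)

lemma bounded_edit_distance_eq (s1 s2 : String) (t : Int) :
    bounded_edit_distance s1 s2 t =
      if D s1.toList s2.toList s1.toList.length s2.toList.length ≤ t
      then some (D s1.toList s2.toList s1.toList.length s2.toList.length) else none := by
  unfold bounded_edit_distance
  dsimp only
  set cs1 := s1.toList
  set cs2 := s2.toList
  set n := cs1.length with hn
  set m := cs2.length with hm
  by_cases hfil : t < |(n : Int) - (m : Int)|
  · rw [if_pos hfil]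
    have hlb := D_lb cs1 cs2 n m
    rw [if_neg (by omega)]
  · rw [if_neg hfil]
    have hrow0 : PySem.List.pyRange 0 ((m : Int) + 1) 1 = rowD cs1 cs2 m 0 := by
      rw [show ((m : Int) + 1) = ((m + 1 : Nat) : Int) by push_cast; ring,
         PySem.List.pyRange_zero_nat]
      unfold rowD
      exact map_range_congr _ _ _ (fun c _ => (D_zero_left cs1 cs2 c).symm)
    have hrange : PySem.List.pyRange 1 ((n : Int) + 1) 1
        = PySem.List.pyRange (((0 : Nat) : Int) + 1) ((n : Int) + 1) 1 := by norm_num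
    rw [hrow0, hrange]
    have hcases := bGo_cases cs1 cs2 t n rfl n 0 (by omega) (by omega)
    rcases hcases with h | ⟨h, hgt⟩
    · rw [h]
      dsimp only
      rw [rowD_getD_last]
    · rw [← hm] at hgt
      rw [h, if_neg (by omega)]

-- ===== VERDICT (by name: the statement is the Claim_ definition above) =====
theorem detect_plagiarism_spec : Claim_equal_detect_plagiarism := by
  intro alignment doc1 doc2 threshold _ _
  unfold Spec_detect_plagiarism detect_plagiarism detect_plagiarism_alt
  refine PySem.List.foldl_congr_mem alignment _ _ [] ?_
  intro acc p _
  obtain ⟨i | i, j | j⟩ := p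
  · rfl
  · rfl
  · rfl
  · simp only []
    rw [edit_distance_eq_D, bounded_edit_distance_eq]
    split_ifs with h <;> simp
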